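-- pv_equiv track=rewrite | github.com/AndreaStudy/PythonAlgo | baekjoon/silver/s1_1802.py | devide
-- ===== SOURCE A (Python) =====
-- def devide(lst):
--   todo = list(lst)
--
--   while len(todo) >= 3:
--     for i in range(2, len(todo), 2):
--       if todo[i-2] == todo[i]:
--         return False
--
--     next = []
--     for i in range(1, len(todo), 2):
--       next.append(todo[i])
--
--     todo = next
--
--   return True
-- ===== SOURCE B (Python) =====
-- def devide(lst):
--     # Index arithmetic on the original list: at halving level k the surviving
--     # elements sit at original indices (2**k - 1) + j*2**k; no sublist is built.
--     lst = list(lst)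
--     n = len(lst)
--     k = 0
--     while (n >> k) >= 3:
--         off = (1 << k) - 1
--         step = 1 << (k + 1)
--         for j in range(((n >> k) - 1) // 2):
--             a = off + j * step
--             if lst[a] == lst[a + step]:
--                 return False
--         k += 1
--     return True
-- ===== Notes on version B (the rewrite author's own statement) =====
-- stated objective: alternative
-- what changed: B never builds the halved sublists: it walks the original list by index arithmetic, at level k comparing elements at indices (2^k-1)+j*2^(k+1), while A repeatedly materialises a new half-length list per level.
import Mathlib
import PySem

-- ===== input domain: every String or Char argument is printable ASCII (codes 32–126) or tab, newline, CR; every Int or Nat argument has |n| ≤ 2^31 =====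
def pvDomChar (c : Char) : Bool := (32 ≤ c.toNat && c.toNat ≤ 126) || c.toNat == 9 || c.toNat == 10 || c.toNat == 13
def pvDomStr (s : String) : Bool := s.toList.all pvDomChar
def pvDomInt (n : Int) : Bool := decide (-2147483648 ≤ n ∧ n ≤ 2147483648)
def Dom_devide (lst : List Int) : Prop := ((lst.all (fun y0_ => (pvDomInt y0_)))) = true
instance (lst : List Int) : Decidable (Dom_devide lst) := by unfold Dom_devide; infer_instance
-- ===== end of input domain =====

-- B computes the same answer by index arithmetic on the original list (offset/stride per level)
-- instead of A's repeated construction of halved sublists.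

-- ===== PORT A =====
-- 'for i in range(2, len(todo), 2): if todo[i-2] == todo[i]: return False'
-- walked structurally: compares positions (0,2),(2,4),… of the current list.
def pvScanA : List Int → Bool
  | a :: _ :: c :: rest => if a == c then false else pvScanA (c :: rest)
  | _ => true

-- 'next = []; for i in range(1, len(todo), 2): next.append(todo[i])'
-- collects the elements at odd positions, in order.
def pvHalveA : List Int → List Int
  | _ :: b :: rest => b :: pvHalveA rest
  | _ => []

theorem pvHalveA_length (l : List Int) : (pvHalveA l).length = l.length / 2 := by
  match l with
  | [] => rfl
  | [a] => simp [pvHalveA]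
  | a :: b :: rest =>
      rw [pvHalveA, List.length_cons, pvHalveA_length rest]
      simp
      omega

-- 'while len(todo) >= 3: … todo = next'
def devide (lst : List Int) : Bool :=
  if _h : 3 ≤ lst.length then
    if pvScanA lst then devide (pvHalveA lst) else false
  else true
termination_by lst.length
decreasing_by rw [pvHalveA_length]; omega

-- ===== PORT B =====
-- 'for j in range(c): a = off + j*step; if lst[a] == lst[a+step]: return False'
def pvScanB (lst : List Int) (off step j : Nat) : Nat → Bool
  | 0 => true
  | c + 1 =>
    if PySem.List.pyGetD lst ((off + j * step : Nat) : Int) 0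
         == PySem.List.pyGetD lst ((off + j * step + step : Nat) : Int) 0 then false
    else pvScanB lst off step (j + 1) c

-- 'while (n >> k) >= 3: … k += 1'
def pvLoopB (lst : List Int) (n k : Nat) : Bool :=
  if _h : 3 ≤ n >>> k then
    if pvScanB lst ((1 <<< k) - 1) (1 <<< (k + 1)) 0 ((n >>> k - 1) / 2)
    then pvLoopB lst n (k + 1)
    else false
  else true
termination_by n >>> k
decreasing_by rw [Nat.shiftRight_succ]; omega

def devide_alt (lst : List Int) : Bool := pvLoopB lst lst.length 0

-- ===== PRECONDITION & SPEC =====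
def Spec_devide (lst : List Int) (out : Bool) : Prop := out = devide_alt lst
instance (lst : List Int) (out : Bool) : Decidable (Spec_devide lst out) := by unfold Spec_devide; infer_instance

-- ===== CLAIM (what is proved, stated in full; the proofs are below) =====
def Claim_equal_devide : Prop := ∀ (lst : List Int), Dom_devide lst → Spec_devide lst (devide lst)

-- ===== LEMMAS AND PROOFS =====

theorem cons2_getD (a b : Int) (l : List Int) (n : Nat) (d : Int) :
    (a :: b :: l).getD (n + 2) d = l.getD n d := by
  rw [show n + 2 = n + 1 + 1 from rfl, List.getD_cons_succ, List.getD_cons_succ]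

theorem pvHalveA_getD (l : List Int) (p : Nat) (d : Int) :
    (pvHalveA l).getD p d = l.getD (2 * p + 1) d := by
  match l with
  | [] => simp [pvHalveA]
  | [a] =>
      rw [show 2 * p + 1 = (2 * p) + 1 from rfl, List.getD_cons_succ]
      simp [pvHalveA]
  | a :: b :: rest =>
      cases p with
      | zero => simp [pvHalveA]
      | succ p =>
          have e : 2 * (p + 1) + 1 = (2 * p + 1) + 2 := by ring
          rw [pvHalveA, List.getD_cons_succ, e, cons2_getD]
          exact pvHalveA_getD rest p d

def pvIterH (k : Nat) (l : List Int) : List Int := pvHalveA^[k] l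

theorem pvIterH_succ (k : Nat) (l : List Int) : pvIterH (k+1) l = pvIterH k (pvHalveA l) := by
  simp [pvIterH, Function.iterate_succ_apply]

theorem pvIterH_succ' (k : Nat) (l : List Int) : pvIterH (k+1) l = pvHalveA (pvIterH k l) :=
  Function.iterate_succ_apply' pvHalveA k l

theorem pvIterH_length (k : Nat) (l : List Int) : (pvIterH k l).length = l.length >>> k := by
  induction k generalizing l with
  | zero => simp [pvIterH]
  | succ k ih =>
      rw [pvIterH_succ, ih, pvHalveA_length, Nat.shiftRight_eq_div_pow,
        Nat.shiftRight_eq_div_pow, pow_succ, Nat.div_div_eq_div_mul, Nat.mul_comm]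

theorem pvIterH_getD (k : Nat) (l : List Int) (p : Nat) (d : Int) :
    (pvIterH k l).getD p d = l.getD (2 ^ k - 1 + p * 2 ^ k) d := by
  induction k generalizing p l with
  | zero => simp [pvIterH]
  | succ k ih =>
      rw [pvIterH_succ, ih, pvHalveA_getD]
      congr 1
      have h1 : 1 ≤ 2 ^ k := Nat.one_le_two_pow
      have e : p * 2 ^ (k + 1) = 2 * (p * 2 ^ k) := by rw [pow_succ]; ring
      rw [e, pow_succ]
      omega

-- characterisation of A's level scan
theorem pvScanA_char (m : List Int) :
    pvScanA m = decide (∀ j < (m.length - 1) / 2, m.getD (2 * j) 0 ≠ m.getD (2 * j + 2) 0) := by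
  match m with
  | [] => simp [pvScanA]
  | [a] => simp [pvScanA]
  | [a, b] => simp [pvScanA]
  | a :: b :: c :: rest =>
      have hlen : ((a :: b :: c :: rest).length - 1) / 2 = rest.length / 2 + 1 := by
        simp; omega
      have hlen' : ((c :: rest).length - 1) / 2 = rest.length / 2 := by simp
      by_cases h : a = c
      · rw [pvScanA, if_pos (by simpa using h)]
        symm
        simp only [decide_eq_false_iff_not]
        intro H
        exact H 0 (by omega) (by simpa [cons2_getD] using h)
      · rw [pvScanA, if_neg (by simpa using h), pvScanA_char (c :: rest)]
        congr 1
        apply propext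
        rw [hlen, hlen']
        constructor
        · intro H j hj
          cases j with
          | zero => simpa [cons2_getD] using h
          | succ j =>
              have := H j (by omega)
              have e1 : 2 * (j + 1) = 2 * j + 2 := by ring
              rwa [e1, cons2_getD, cons2_getD]
        · intro H j hj
          have := H (j + 1) (by omega)
          have e1 : 2 * (j + 1) = 2 * j + 2 := by ring
          rwa [e1, cons2_getD, cons2_getD] at this

-- characterisation of B's level scan
theorem pvScanB_char (lst : List Int) (off step : Nat) (j c : Nat) :
    pvScanB lst off step j c
      = decide (∀ t < c, lst.getD (off + (j + t) * step) 0 ≠ lst.getD (off + (j + t) * step + step) 0) := by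
  induction c generalizing j with
  | zero => simp [pvScanB]
  | succ c ih =>
      rw [pvScanB, ih]
      by_cases h : lst.getD (off + j * step) 0 = lst.getD (off + j * step + step) 0
      · rw [if_pos (by rw [PySem.List.pyGetD_natCast, PySem.List.pyGetD_natCast]; exact beq_iff_eq.mpr h)]
        symm
        simp only [decide_eq_false_iff_not]
        intro Hall
        exact Hall 0 (by omega) (by simpa using h)
      · rw [if_neg (by rw [PySem.List.pyGetD_natCast, PySem.List.pyGetD_natCast]; simpa using h)]
        congr 1
        apply propext
        constructor
        · intro Hall t ht
          cases t with
          | zero => simpa using h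
          | succ t =>
              have := Hall t (by omega)
              have e : j + (t + 1) = j + 1 + t := by ring
              rwa [e]
        · intro Hall t ht
          have := Hall (t + 1) (by omega)
          have e : j + (t + 1) = j + 1 + t := by ring
          rwa [e] at this

theorem pvScan_link (lst : List Int) (k : Nat) :
    pvScanA (pvIterH k lst)
      = pvScanB lst ((1 <<< k) - 1) (1 <<< (k + 1)) 0 ((lst.length >>> k - 1) / 2) := by
  rw [pvScanA_char, pvScanB_char, pvIterH_length]
  congr 1
  apply propext
  have h2 : (1 <<< k) = 2 ^ k := by simp [Nat.shiftLeft_eq]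
  have h2' : (1 <<< (k + 1)) = 2 ^ (k + 1) := by simp [Nat.shiftLeft_eq]
  have hp : 1 ≤ 2 ^ k := Nat.one_le_two_pow
  have e1 : ∀ t : Nat, 2 ^ k - 1 + 2 * t * 2 ^ k = (1 <<< k) - 1 + (0 + t) * (1 <<< (k + 1)) := by
    intro t
    rw [h2, h2', pow_succ]
    have : (0 + t) * (2 ^ k * 2) = 2 * t * 2 ^ k := by ring
    rw [this]
  have e2 : ∀ t : Nat, 2 ^ k - 1 + (2 * t + 2) * 2 ^ k
      = (1 <<< k) - 1 + (0 + t) * (1 <<< (k + 1)) + (1 <<< (k + 1)) := by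
    intro t
    rw [h2, h2', pow_succ]
    have h3 : (2 * t + 2) * 2 ^ k = 2 * t * 2 ^ k + 2 ^ k * 2 := by ring
    have h4 : (0 + t) * (2 ^ k * 2) = 2 * t * 2 ^ k := by ring
    rw [h3, h4]
    omega
  constructor
  · intro H t ht
    have := H t ht
    rw [pvIterH_getD, pvIterH_getD, e1 t, e2 t] at this
    exact this
  · intro H t ht
    have := H t ht
    rw [pvIterH_getD, pvIterH_getD, e1 t, e2 t]
    exact this

theorem pvLoop_link (lst : List Int) (k : Nat) :
    devide (pvIterH k lst) = pvLoopB lst lst.length k := by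
  generalize hm : lst.length >>> k = m
  induction m using Nat.strong_induction_on generalizing k with
  | _ m ih =>
    rw [devide, pvLoopB, pvIterH_length, hm]
    by_cases h3 : 3 ≤ m
    · rw [dif_pos h3, dif_pos h3, pvScan_link, hm]
      cases hs : pvScanB lst ((1 <<< k) - 1) (1 <<< (k + 1)) 0 ((m - 1) / 2)
      · simp
      · rw [if_pos rfl, if_pos rfl, ← pvIterH_succ']
        exact ih (lst.length >>> (k + 1)) (by rw [Nat.shiftRight_succ, hm]; omega) (k + 1) rfl
    · rw [dif_neg h3, dif_neg h3]

-- ===== VERDICT (by name: the statement is the Claim_ definition above) =====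
theorem devide_spec : Claim_equal_devide := by
  intro lst _
  show devide lst = devide_alt lst
  have := pvLoop_link lst 0
  simpa [pvIterH, devide_alt] using this
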